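-- pv_equiv track=rewrite | github.com/MarkoKajtazi/Password-Wizard | potions.py | sell_ingredient
-- ===== SOURCE A (Python) =====
-- import pygame, string
--
-- POTION_PRICES_MAP = {
--     "uppercase": 50,
--     "special_characters": 80,
--     "numbers": 100,
-- }
--
-- def sell_ingredient(ingredient_type, coins, inventory, current_text):
--     if inventory[ingredient_type] > 0:
--         refund = int(POTION_PRICES_MAP.get(ingredient_type, 0))
--         coins += refund
--         inventory[ingredient_type] -= 1
--
--         new_text = ""
--         removed = False
--
--         char_list = list(current_text)
--         for i in range(len(char_list) - 1, -1, -1):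
--             char = char_list[i]
--             match = False
--
--             if ingredient_type == "uppercase" and char.isupper():
--                 match = True
--             elif ingredient_type == "numbers" and char.isdigit():
--                 match = True
--             elif ingredient_type == "special_characters" and char in string.punctuation:
--                 match = True
--
--             if match and not removed:
--                 char_list.pop(i)
--                 removed = True
--                 break
--
--         current_text = "".join(char_list)
--
--     return coins, inventory, current_text
-- ===== SOURCE B (Python) =====
-- import string
--
-- _PRICES = {"uppercase": 50, "special_characters": 80, "numbers": 100}
-- _PREDS = {
--     "uppercase": str.isupper,
--     "numbers": str.isdigit,
--     "special_characters": lambda ch: ch in string.punctuation,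
-- }
--
-- def sell_ingredient(ingredient_type, coins, inventory, current_text):
--     if inventory[ingredient_type] > 0:
--         coins += _PRICES.get(ingredient_type, 0)
--         inventory[ingredient_type] -= 1
--         pred = _PREDS.get(ingredient_type)
--         if pred is not None:
--             idx = max((i for i, ch in enumerate(current_text) if pred(ch)), default=-1)
--             if idx >= 0:
--                 current_text = current_text[:idx] + current_text[idx + 1:]
--     return coins, inventory, current_text
-- ===== Notes on version B (the rewrite author's own statement) =====
-- stated objective: simpler
-- what changed: A scans the character list backward with an index loop, pop and break inside a chained if/elif match test; B dispatches the character predicate once from a small mapping, computes the last matching position with max over enumerate (default -1), and removes it by slicing, with no predicate entry meaning no scan at all.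
import Mathlib
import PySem

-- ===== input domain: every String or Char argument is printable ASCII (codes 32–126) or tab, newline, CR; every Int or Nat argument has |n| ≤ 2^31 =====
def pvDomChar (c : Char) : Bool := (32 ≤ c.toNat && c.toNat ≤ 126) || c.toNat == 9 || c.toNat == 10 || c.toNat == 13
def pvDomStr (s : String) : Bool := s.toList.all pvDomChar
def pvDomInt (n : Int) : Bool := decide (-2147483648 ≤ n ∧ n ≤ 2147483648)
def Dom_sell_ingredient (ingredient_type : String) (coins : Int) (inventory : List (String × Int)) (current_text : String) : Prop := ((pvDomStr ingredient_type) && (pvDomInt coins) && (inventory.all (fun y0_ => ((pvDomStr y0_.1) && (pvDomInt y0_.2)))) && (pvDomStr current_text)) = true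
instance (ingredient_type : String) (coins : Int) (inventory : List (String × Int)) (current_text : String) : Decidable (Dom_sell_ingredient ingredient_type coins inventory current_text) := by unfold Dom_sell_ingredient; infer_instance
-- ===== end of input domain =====

-- B replaces A's backward pop-and-break scan by a predicate dispatched once from a mapping plus
-- removal at the last matching index found with max-over-enumerate and slicing (objective: simpler).
-- Both Pythons decrement inventory[ingredient_type] in place the same way; equivalence covers the return value.


-- ===== PORT A =====

-- string.punctuation (exact: the 32 ASCII punctuation characters, in CPython's order)
def punctuationChars : List Char := "!\"#$%&'()*+,-./:;<=>?@[\\]^_`{|}~".toList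

-- POTION_PRICES_MAP
def POTION_PRICES_MAP : PySem.Dict String Int :=
  PySem.Dict.ofList [("uppercase", 50), ("special_characters", 80), ("numbers", 100)]

-- the if/elif chain computing `match` for one char (extracted as a helper, body unchanged)
def matchA (ingredient_type : String) (char : Char) : Bool :=
  if ingredient_type == "uppercase" && PySem.Chars.isupper char then true
  else if ingredient_type == "numbers" && PySem.Chars.isdigit char then true
  else if ingredient_type == "special_characters" && punctuationChars.contains char then true
  else false

-- the backward `for i in range(len-1, -1, -1)` loop; `pop` + `break` returns immediately
-- (since `break` follows at once, `removed` is always False when tested)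
def aLoop (p : Char → Bool) (cs : List Char) (idxs : List Int) : List Char :=
  match idxs with
  | [] => cs
  | i :: rest =>
    match PySem.List.pyGet? cs i with
    | none => cs            -- unreachable: i is always in range
    | some char =>
      if p char then
        match PySem.List.pop? cs i with
        | none => cs        -- unreachable
        | some r => r.2     -- char_list.pop(i); removed = True; break
      else aLoop p cs rest

def sell_ingredient (ingredient_type : String) (coins : Int) (inventory : List (String × Int)) (current_text : String) : Int × (List (String × Int)) × String :=
  match (PySem.Dict.mk inventory).get? ingredient_type with
  | none => (coins, inventory, current_text)   -- KeyError: excluded by Pre_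
  | some v =>
    if v > 0 then
      let refund := POTION_PRICES_MAP.getD ingredient_type 0
      let coins := coins + refund
      let inventory' := ((PySem.Dict.mk inventory).insert ingredient_type (v - 1)).items
      let char_list := current_text.toList
      let char_list :=
        aLoop (matchA ingredient_type) char_list
          (PySem.List.pyRange ((char_list.length : Int) - 1) (-1) (-1))
      (coins, inventory', String.ofList char_list)   -- "".join(char_list)
    else (coins, inventory, current_text)

-- ===== PORT B =====

-- _PRICES
def bPrices : PySem.Dict String Int :=
  PySem.Dict.ofList [("uppercase", 50), ("special_characters", 80), ("numbers", 100)]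

-- _PREDS: mapping from ingredient_type to a character predicate
def bPreds : PySem.Dict String (Char → Bool) :=
  PySem.Dict.ofList
    [("uppercase", PySem.Chars.isupper),
     ("numbers", PySem.Chars.isdigit),
     ("special_characters", fun ch => punctuationChars.contains ch)]

-- idx = max((i for i, ch in enumerate(current_text) if pred(ch)), default=-1);
-- if idx >= 0: current_text = current_text[:idx] + current_text[idx+1:]
def bRemoveLast (p : Char → Bool) (cs : List Char) : List Char :=
  let idx := PySem.List.maxD (((PySem.List.enumerate cs 0).filter (fun ic => p ic.2)).map (·.1)) (fun i => i) (-1)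
  if 0 ≤ idx then PySem.List.slice cs none (some idx) ++ PySem.List.slice cs (some (idx + 1)) none
  else cs

def sell_ingredient_alt (ingredient_type : String) (coins : Int) (inventory : List (String × Int)) (current_text : String) : Int × (List (String × Int)) × String :=
  match (PySem.Dict.mk inventory).get? ingredient_type with
  | none => (coins, inventory, current_text)   -- KeyError: excluded by Pre_
  | some v =>
    if v > 0 then
      let coins := coins + bPrices.getD ingredient_type 0
      let inventory' := ((PySem.Dict.mk inventory).insert ingredient_type (v - 1)).items
      match bPreds.get? ingredient_type with
      | none => (coins, inventory', current_text)
      | some pred => (coins, inventory', String.ofList (bRemoveLast pred current_text.toList))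
    else (coins, inventory, current_text)

-- ===== PRECONDITION & SPEC =====
-- Pre_ excludes exactly the inputs where both Pythons raise KeyError: ingredient_type not a key of inventory.
def Pre_sell_ingredient (ingredient_type : String) (coins : Int) (inventory : List (String × Int)) (current_text : String) : Prop :=
  ingredient_type ∈ inventory.map Prod.fst
instance (ingredient_type : String) (coins : Int) (inventory : List (String × Int)) (current_text : String) : Decidable (Pre_sell_ingredient ingredient_type coins inventory current_text) := by unfold Pre_sell_ingredient; infer_instance

def pvWitness_sell_ingredient : String × Int × (List (String × Int)) × String :=
  ("uppercase", 10, [("uppercase", 2), ("numbers", 0)], "abA!B2c")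

def Spec_sell_ingredient (ingredient_type : String) (coins : Int) (inventory : List (String × Int)) (current_text : String) (out : Int × (List (String × Int)) × String) : Prop := out = sell_ingredient_alt ingredient_type coins inventory current_text
instance (ingredient_type : String) (coins : Int) (inventory : List (String × Int)) (current_text : String) (out : Int × (List (String × Int)) × String) : Decidable (Spec_sell_ingredient ingredient_type coins inventory current_text out) := by unfold Spec_sell_ingredient; infer_instance

-- ===== CLAIM (what is proved, stated in full; the proofs are below) =====
def Claim_equal_sell_ingredient : Prop := ∀ (ingredient_type : String) (coins : Int) (inventory : List (String × Int)) (current_text : String), Dom_sell_ingredient ingredient_type coins inventory current_text → Pre_sell_ingredient ingredient_type coins inventory current_text → Spec_sell_ingredient ingredient_type coins inventory current_text (sell_ingredient ingredient_type coins inventory current_text)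

-- ===== LEMMAS AND PROOFS =====

-- for the three known ingredient types the dispatched predicate is A's if/elif chain
lemma matchA_eq_upper : matchA "uppercase" = PySem.Chars.isupper := by
  funext c; simp [matchA]

lemma matchA_eq_numbers : matchA "numbers" = PySem.Chars.isdigit := by
  funext c; simp [matchA]

lemma matchA_eq_special : matchA "special_characters" = fun ch => punctuationChars.contains ch := by
  funext c; simp [matchA]

-- an unrecognised ingredient type never matches
lemma matchA_other (it : String) (h1 : it ≠ "uppercase") (h2 : it ≠ "numbers")
    (h3 : it ≠ "special_characters") (c : Char) : matchA it c = false := by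
  simp [matchA, h1, h2, h3]

-- A's loop with a predicate that never matches leaves the list unchanged
lemma aLoop_nomatch (p : Char → Bool) (hp : ∀ c, p c = false) (cs : List Char) (idxs : List Int) :
    aLoop p cs idxs = cs := by
  induction idxs with
  | nil => rfl
  | cons i rest ih =>
    simp only [aLoop]
    cases PySem.List.pyGet? cs i with
    | none => rfl
    | some c => simp [hp c, ih]

-- indices strictly below ds.length only touch ds inside ds ++ [c]
lemma aLoop_append (p : Char → Bool) (ds : List Char) (c : Char) (idxs : List Int)
    (h : ∀ i ∈ idxs, 0 ≤ i ∧ i < (ds.length : Int)) :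
    aLoop p (ds ++ [c]) idxs = aLoop p ds idxs ++ [c] := by
  induction idxs with
  | nil => rfl
  | cons i rest ih =>
    obtain ⟨h0, hlt⟩ := h i (by simp)
    have hn : i.toNat < ds.length := by omega
    have hi' : i = ((i.toNat : Nat) : Int) := by omega
    have hget : PySem.List.pyGet? (ds ++ [c]) i = PySem.List.pyGet? ds i := by
      rw [hi', PySem.List.pyGet?_natCast, PySem.List.pyGet?_natCast,
          List.getElem?_append_left hn]
    simp only [aLoop, hget]
    cases hq : PySem.List.pyGet? ds i with
    | none =>
      exfalso
      rw [hi', PySem.List.pyGet?_natCast] at hq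
      simp at hq
      omega
    | some ch =>
      by_cases hp : p ch
      · rw [hi', PySem.List.pop?_natCast (ds ++ [c]) i.toNat (by simp; omega),
            PySem.List.pop?_natCast ds i.toNat hn]
        simp [hp, List.eraseIdx_append_of_lt_length hn]
      · simp [hp, ih (fun j hj => h j (by simp [hj]))]

-- A's backward scan removes the LAST match: it equals eraseP on the reverse
lemma aLoop_spec (p : Char → Bool) (cs : List Char) :
    aLoop p cs (PySem.List.pyRange ((cs.length : Int) - 1) (-1) (-1)) =
      (cs.reverse.eraseP p).reverse := by
  induction cs using List.reverseRecOn with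
  | nil =>
    rw [PySem.List.pyRange_neg_one_eq_nil (by norm_num)]
    rfl
  | append_singleton ds c ih =>
    have hlen : ((ds ++ [c]).length : Int) - 1 = (ds.length : Int) := by simp
    rw [hlen, PySem.List.pyRange_neg_one_cons (by omega)]
    simp only [aLoop]
    have hget : PySem.List.pyGet? (ds ++ [c]) (ds.length : Int) = some c := by
      rw [PySem.List.pyGet?_natCast]
      simp
    rw [hget]
    by_cases hp : p c
    · rw [PySem.List.pop?_natCast (ds ++ [c]) ds.length (by simp)]
      simp [hp, List.eraseIdx_append]
    · have hpf : p c = false := by simpa using hp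
      have hmem : ∀ i ∈ PySem.List.pyRange ((ds.length : Int) - 1) (-1) (-1),
          0 ≤ i ∧ i < (ds.length : Int) := by
        intro i hi
        rw [PySem.List.mem_pyRange_neg_one] at hi
        omega
      simp only [hpf, Bool.false_eq_true, if_false]
      rw [aLoop_append p ds c _ hmem, ih]
      simp [hpf]

-- aLoop_spec restated through String.length (the form simp leaves in the main proof)
lemma aLoop_str (p : Char → Bool) (txt : String) :
    aLoop p txt.toList (PySem.List.pyRange ((txt.length : Int) - 1) (-1) (-1)) =
      (txt.toList.reverse.eraseP p).reverse := by
  have h := aLoop_spec p txt.toList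
  simpa using h

-- every collected index is a valid position
lemma mem_msIdx (p : Char → Bool) (cs : List Char) (i : Int)
    (hi : i ∈ ((PySem.List.enumerate cs 0).filter (fun ic => p ic.2)).map (·.1)) :
    0 ≤ i ∧ i < (cs.length : Int) := by
  simp only [List.mem_map, List.mem_filter] at hi
  obtain ⟨⟨j, ch⟩, ⟨hmem, _⟩, rfl⟩ := hi
  rw [PySem.List.mem_enumerate_iff] at hmem
  obtain ⟨k, hk, heq⟩ := hmem
  simp at heq
  omega

-- max(..., default) of a list whose last element dominates is that element
lemma maxD_append_last (xs : List Int) (m : Int) (h : ∀ y ∈ xs, y ≤ m) :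
    PySem.List.maxD (xs ++ [m]) (fun i => i) (-1) = m := by
  cases hq : PySem.List.max? (xs ++ [m]) (fun i : Int => i) with
  | none => simp [PySem.List.max?_eq_none_iff] at hq
  | some y =>
    have hmem := PySem.List.max?_mem hq
    have hismax := PySem.List.max?_isMax hq
    have h1 : y ≤ m := by
      rcases List.mem_append.mp hmem with hy | hy
      · exact h y hy
      · simp at hy; omega
    have h2 : m ≤ y := hismax m (by simp)
    simp only [PySem.List.maxD, hq, Option.getD_some]
    omega

-- B's max-index removal also removes the LAST match
lemma bRemoveLast_spec (p : Char → Bool) (cs : List Char) :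
    bRemoveLast p cs = (cs.reverse.eraseP p).reverse := by
  induction cs using List.reverseRecOn with
  | nil => rfl
  | append_singleton ds c ih =>
    have hms : ((PySem.List.enumerate (ds ++ [c]) 0).filter (fun ic => p ic.2)).map (·.1) =
        (((PySem.List.enumerate ds 0).filter (fun ic => p ic.2)).map (·.1)) ++
          (if p c then [(ds.length : Int)] else []) := by
      rw [PySem.List.enumerate_append]
      simp only [List.filter_append, List.map_append]
      congr 1
      by_cases hp : p c <;> simp [PySem.List.enumerate, hp]
    set ms := (((PySem.List.enumerate ds 0).filter (fun ic => p ic.2)).map (·.1)) with hmsdef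
    by_cases hp : p c
    · -- the new last char matches: idx = ds.length, it is dropped
      have hms' : ((PySem.List.enumerate (ds ++ [c]) 0).filter (fun ic => p ic.2)).map (·.1) =
          ms ++ [(ds.length : Int)] := by rw [hms, if_pos hp]
      have hmax : PySem.List.maxD (ms ++ [(ds.length : Int)]) (fun i => i) (-1) =
          (ds.length : Int) :=
        maxD_append_last ms _ (fun y hy => le_of_lt (mem_msIdx p ds y (hmsdef ▸ hy)).2)
      simp only [bRemoveLast, hms', hmax]
      rw [if_pos (show (0 : Int) ≤ (ds.length : Int) by omega)]
      rw [PySem.List.slice_to _ (by omega), PySem.List.slice_from _ (by omega)]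
      have h1 : ((ds.length : Int)).toNat = ds.length := by omega
      have h2 : ((ds.length : Int) + 1).toNat = ds.length + 1 := by omega
      rw [h1, h2, List.take_append_of_le_length (Nat.le_refl _)]
      simp [hp]
    · -- last char does not match: reduce to ds
      have hpf : p c = false := by simpa using hp
      have hms' : ((PySem.List.enumerate (ds ++ [c]) 0).filter (fun ic => p ic.2)).map (·.1) =
          ms := by rw [hms, if_neg (by simp [hpf])]; simp
      have hspec : ((ds ++ [c]).reverse.eraseP p).reverse =
          (ds.reverse.eraseP p).reverse ++ [c] := by simp [hpf]
      rw [hspec, ← ih]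
      simp only [bRemoveLast, hms', ← hmsdef]
      cases hq : PySem.List.max? ms (fun i : Int => i) with
      | none =>
        have hmax : PySem.List.maxD ms (fun i => i) (-1) = -1 := by
          simp [PySem.List.maxD, hq]
        rw [hmax, if_neg (by norm_num), if_neg (by norm_num)]
      | some m =>
        have hmax : PySem.List.maxD ms (fun i => i) (-1) = m := by
          simp [PySem.List.maxD, hq]
        have hmem := PySem.List.max?_mem hq
        obtain ⟨h0, hlt⟩ := mem_msIdx p ds m (hmsdef ▸ hmem)
        rw [hmax, if_pos h0, if_pos h0]
        rw [PySem.List.slice_to _ (by omega), PySem.List.slice_from _ (by omega),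
            PySem.List.slice_to _ h0, PySem.List.slice_from _ (by omega)]
        rw [List.take_append_of_le_length (by omega),
            List.drop_append_of_le_length (by omega), List.append_assoc]

-- ===== VERDICT (by name: the statement is the Claim_ definition above) =====
theorem sell_ingredient_spec : Claim_equal_sell_ingredient := by
  intro it coins inv txt _ hpre
  unfold Spec_sell_ingredient sell_ingredient sell_ingredient_alt
  cases hq : (PySem.Dict.mk inv).get? it with
  | none =>
    exfalso
    rw [PySem.Dict.get?_eq_none_iff_not_mem_keys] at hq
    exact hq hpre
  | some v =>
    by_cases hv : v > 0
    · simp only [if_pos hv]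
      by_cases h1 : it = "uppercase"
      · subst h1
        rw [show bPreds.get? "uppercase" = some PySem.Chars.isupper from rfl]
        simp [matchA_eq_upper, aLoop_str, bRemoveLast_spec, bPrices, POTION_PRICES_MAP]
      · by_cases h2 : it = "numbers"
        · subst h2
          rw [show bPreds.get? "numbers" = some PySem.Chars.isdigit from rfl]
          simp [matchA_eq_numbers, aLoop_str, bRemoveLast_spec, bPrices, POTION_PRICES_MAP]
        · by_cases h3 : it = "special_characters"
          · subst h3
            rw [show bPreds.get? "special_characters" =
                  some (fun ch => punctuationChars.contains ch) from rfl]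
            simp [matchA_eq_special, aLoop_str, bRemoveLast_spec, bPrices, POTION_PRICES_MAP]
          · -- unknown ingredient type: no predicate on B's side, A's loop never matches
            have hb : bPreds.get? it = none := by
              rw [PySem.Dict.get?_eq_none_iff_not_mem_keys,
                  show bPreds.keys = ["uppercase", "numbers", "special_characters"] from rfl]
              simp [h1, h2, h3]
            rw [hb, aLoop_nomatch _ (matchA_other it h1 h2 h3)]
            simp [bPrices, POTION_PRICES_MAP]
    · simp [hv]
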